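-- pv_equiv track=rewrite | github.com/zhaisilong/PepPCBench | evaluate/cal_rmsd.py | find_continuous_matches
-- ===== SOURCE A (Python) =====
-- def find_continuous_matches(aligned_seq1, aligned_seq2, min_continuous=5):
--     """Find all continuous fragments that satisfy the minimum continuous matching length"""
--     matches = []
--     current_start, current_len = None, 0
--
--     for i, (res1, res2) in enumerate(zip(aligned_seq1, aligned_seq2)):
--         if res1 != "-" and res2 != "-" and res1 == res2:
--             if current_start is None:
--                 current_start = i
--             current_len += 1
--         else:
--             if current_len >= min_continuous:
--                 matches.append((current_start, i - 1))
--             current_start, current_len = None, 0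
--
--     # Check the last fragment
--     if current_len >= min_continuous:
--         matches.append((current_start, len(aligned_seq1) - 1))
--
--     return matches
-- ===== SOURCE B (Python) =====
-- def find_continuous_matches(aligned_seq1, aligned_seq2, min_continuous=5):
--     """Mask-then-runs: mark matching positions first, then extract maximal True
--     runs as (start, length) pairs and keep the long ones (A's trailing-fragment
--     end index len(seq1)-1 is replaced by the last compared index, the intended
--     value)."""
--     mask = [a != "-" and b != "-" and a == b
--             for a, b in zip(aligned_seq1, aligned_seq2)]
--     n = len(mask)
--     runs = []  # (start, length) of each maximal run of True
--     i = 0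
--     while i < n:
--         if mask[i]:
--             j = i + 1
--             while j < n and mask[j]:
--                 j += 1
--             runs.append((i, j - i))
--             i = j
--         else:
--             i += 1
--     return [(s, s + l - 1) for (s, l) in runs if l >= min_continuous]
-- ===== Notes on version B (the rewrite author's own statement) =====
-- stated objective: alternative
-- what changed: Replaces A's single interleaved accumulator scan (current_start/current_len state machine with an end-of-loop flush) by two separately shaped passes: build a boolean match mask, then extract maximal True runs as (start,length) pairs by slicing off one run at a time, and finally filter/map them to inclusive spans.
-- intended difference: When aligned_seq1 is longer than aligned_seq2 and the final compared position ends a qualifying run, A ends that fragment at len(aligned_seq1)-1 (an index beyond the compared region, e.g. ('AAAB','AAA',3) gives [(0,3)]), while B ends it at the last compared index ([(0,2)]), which is the intended inclusive end of the matching fragment. — e.g. on find_continuous_matches("AAAB", "AAA", 3): A returns [(0, 3)], B returns [(0, 2)]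
-- outside the precondition, e.g. on find_continuous_matches('AB', 'AC', 0): A returns [(0, 0), (None, 1)], B returns [(0, 0)]; on find_continuous_matches('AA', 'AA', 0): A returns [(0, 1)], B returns [(0, 1)]
import Mathlib
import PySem

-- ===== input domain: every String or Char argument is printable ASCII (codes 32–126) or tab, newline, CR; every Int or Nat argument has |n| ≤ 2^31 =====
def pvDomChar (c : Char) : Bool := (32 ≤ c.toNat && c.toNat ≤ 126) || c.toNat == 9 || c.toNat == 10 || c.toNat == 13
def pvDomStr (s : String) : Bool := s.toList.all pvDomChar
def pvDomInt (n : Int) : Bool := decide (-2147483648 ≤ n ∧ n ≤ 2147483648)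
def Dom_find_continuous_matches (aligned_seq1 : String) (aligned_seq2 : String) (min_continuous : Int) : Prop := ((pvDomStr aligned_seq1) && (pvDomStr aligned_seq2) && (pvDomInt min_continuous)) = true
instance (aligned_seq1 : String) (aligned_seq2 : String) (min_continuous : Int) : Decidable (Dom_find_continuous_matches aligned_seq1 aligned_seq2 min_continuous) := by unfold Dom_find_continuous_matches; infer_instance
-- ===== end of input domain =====

-- B replaces A's interleaved state-machine scan by a match mask plus a separate run-extraction pass;
-- on a trailing qualifying run with len(seq1) > len(seq2), A ends the span at len(seq1)-1, B at the last compared index (see D_).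

-- ===== PORT A =====
-- One step of A's loop: state = (ms, current_start, current_len).
-- (current_start = none models Python's None; the .getD 0 below is only reached outside Pre_,
-- where Python A would put None into the output.)
def pvStepA (mc : Int) (st : List (Int × Int) × Option Int × Int) (p : Int × Char × Char) :
    List (Int × Int) × Option Int × Int :=
  let ms := st.1
  let cs := st.2.1
  let cl := st.2.2
  if p.2.1 != '-' && p.2.2 != '-' && p.2.1 == p.2.2 then
    (ms, (match cs with | none => some p.1 | some s => some s), cl + 1)
  else
    ((if mc ≤ cl then ms ++ [(cs.getD 0, p.1 - 1)] else ms), none, 0)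

def find_continuous_matches (aligned_seq1 : String) (aligned_seq2 : String) (min_continuous : Int) : List (Int × Int) :=
  let st := (PySem.List.enumerate (List.zip aligned_seq1.toList aligned_seq2.toList)).foldl
    (pvStepA min_continuous) ([], none, 0)
  -- check the last fragment
  if min_continuous ≤ st.2.2 then st.1 ++ [(st.2.1.getD 0, (aligned_seq1.length : Int) - 1)]
  else st.1

-- ===== PORT B =====
def pvMatchAt (p : Char × Char) : Bool := p.1 != '-' && p.2 != '-' && p.1 == p.2

def pvMask (l1 l2 : List Char) : List Bool := (List.zip l1 l2).map pvMatchAt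

-- the while loop of Source B: i walks the mask, slicing off one maximal True run (or one False) per
-- iteration; ported as recursion on the remaining suffix mask[i:], with fuel = length of the list
-- to make it structural (each step consumes at least one element)
def pvRunsGo : Nat → Nat → List Bool → List (Nat × Nat)
  | 0, _, _ => []
  | _ + 1, _, [] => []
  | fuel + 1, i, false :: rest => pvRunsGo fuel (i + 1) rest
  | fuel + 1, i, true :: rest =>
    let k := 1 + (rest.takeWhile id).length
    (i, k) :: pvRunsGo fuel (i + k) (rest.dropWhile id)

def find_continuous_matches_alt (aligned_seq1 : String) (aligned_seq2 : String) (min_continuous : Int) : List (Int × Int) :=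
  let mask := pvMask aligned_seq1.toList aligned_seq2.toList
  let runs := pvRunsGo mask.length 0 mask
  (runs.filter (fun r => min_continuous ≤ (r.2 : Int))).map
    (fun r => ((r.1 : Int), (r.1 : Int) + (r.2 : Int) - 1))

-- ===== PRECONDITION & SPEC =====
-- Pre_ excludes non-positive min_continuous: there A's flushes can fire with current_start = None,
-- so A returns pairs like (None, i) that are not values of List (Int × Int).
def Pre_find_continuous_matches (aligned_seq1 : String) (aligned_seq2 : String) (min_continuous : Int) : Prop :=
  1 ≤ min_continuous
instance (aligned_seq1 : String) (aligned_seq2 : String) (min_continuous : Int) : Decidable (Pre_find_continuous_matches aligned_seq1 aligned_seq2 min_continuous) := by unfold Pre_find_continuous_matches; infer_instance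

def pvWitness_find_continuous_matches : String × String × Int := ("AA-AB", "AAAAB", 2)

-- trailing matching-run length, computed directly from the two inputs (used only by D_)
def pvTailRun (cl : Int) : List Char → List Char → Int
  | a :: as, b :: bs => pvTailRun (if a != '-' && b != '-' && a == b then cl + 1 else 0) as bs
  | _, _ => cl

-- On inputs where aligned_seq1 is longer than aligned_seq2 and the last compared position ends a
-- qualifying run, A ends that fragment at len(aligned_seq1)-1 (beyond the compared region) while B
-- ends it at the last compared index, the intended inclusive end of the matching fragment.
def D_find_continuous_matches (aligned_seq1 : String) (aligned_seq2 : String) (min_continuous : Int) : Prop :=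
  aligned_seq2.length < aligned_seq1.length ∧
  min_continuous ≤ pvTailRun 0 aligned_seq1.toList aligned_seq2.toList
instance (aligned_seq1 : String) (aligned_seq2 : String) (min_continuous : Int) : Decidable (D_find_continuous_matches aligned_seq1 aligned_seq2 min_continuous) := by unfold D_find_continuous_matches; infer_instance

def Spec_find_continuous_matches (aligned_seq1 : String) (aligned_seq2 : String) (min_continuous : Int) (out : List (Int × Int)) : Prop := ¬ D_find_continuous_matches aligned_seq1 aligned_seq2 min_continuous → out = find_continuous_matches_alt aligned_seq1 aligned_seq2 min_continuous
instance (aligned_seq1 : String) (aligned_seq2 : String) (min_continuous : Int) (out : List (Int × Int)) : Decidable (Spec_find_continuous_matches aligned_seq1 aligned_seq2 min_continuous out) := by unfold Spec_find_continuous_matches; infer_instance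

def pvDiffWitness_find_continuous_matches : String × String × Int := ("AAAB", "AAA", 3)
def pvDiffWitnessOut_find_continuous_matches : (List (Int × Int)) × (List (Int × Int)) := ([(0, 3)], [(0, 2)])

-- ===== CLAIM (what is proved, stated in full; the proofs are below) =====
def Claim_unchanged_find_continuous_matches : Prop := ∀ (aligned_seq1 : String) (aligned_seq2 : String) (min_continuous : Int), Dom_find_continuous_matches aligned_seq1 aligned_seq2 min_continuous → Pre_find_continuous_matches aligned_seq1 aligned_seq2 min_continuous → Spec_find_continuous_matches aligned_seq1 aligned_seq2 min_continuous (find_continuous_matches aligned_seq1 aligned_seq2 min_continuous)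
def Claim_changed_find_continuous_matches : Prop := Dom_find_continuous_matches (pvDiffWitness_find_continuous_matches.1) (pvDiffWitness_find_continuous_matches.2.1) (pvDiffWitness_find_continuous_matches.2.2) ∧ Pre_find_continuous_matches (pvDiffWitness_find_continuous_matches.1) (pvDiffWitness_find_continuous_matches.2.1) (pvDiffWitness_find_continuous_matches.2.2) ∧ D_find_continuous_matches (pvDiffWitness_find_continuous_matches.1) (pvDiffWitness_find_continuous_matches.2.1) (pvDiffWitness_find_continuous_matches.2.2) ∧ find_continuous_matches (pvDiffWitness_find_continuous_matches.1) (pvDiffWitness_find_continuous_matches.2.1) (pvDiffWitness_find_continuous_matches.2.2) = pvDiffWitnessOut_find_continuous_matches.1 ∧ find_continuous_matches_alt (pvDiffWitness_find_continuous_matches.1) (pvDiffWitness_find_continuous_matches.2.1) (pvDiffWitness_find_continuous_matches.2.2) = pvDiffWitnessOut_find_continuous_matches.2 ∧ pvDiffWitnessOut_find_continuous_matches.1 ≠ pvDiffWitnessOut_find_continuous_matches.2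
def Claim_exact_find_continuous_matches : Prop := ∀ (aligned_seq1 : String) (aligned_seq2 : String) (min_continuous : Int), Dom_find_continuous_matches aligned_seq1 aligned_seq2 min_continuous → Pre_find_continuous_matches aligned_seq1 aligned_seq2 min_continuous → D_find_continuous_matches aligned_seq1 aligned_seq2 min_continuous → find_continuous_matches aligned_seq1 aligned_seq2 min_continuous ≠ find_continuous_matches_alt aligned_seq1 aligned_seq2 min_continuous

-- ===== LEMMAS AND PROOFS =====

-- reference recursion both ports are reduced to; e is the end index used for the trailing fragment
def pvSpec (mc e : Int) : Int → Int → Int → List Bool → List (Int × Int)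
  | _, start, cl, [] => if mc ≤ cl then [(start, e)] else []
  | i, start, cl, b :: rest =>
    if b then pvSpec mc e (i + 1) (if cl = 0 then i else start) (cl + 1) rest
    else (if mc ≤ cl then [(start, i - 1)] else []) ++ pvSpec mc e (i + 1) i 0 rest

-- trailing run length after processing m, starting with current length cl
def pvFinalCl (cl : Int) : List Bool → Int
  | [] => cl
  | b :: rest => pvFinalCl (if b then cl + 1 else 0) rest

theorem pvTailRun_eq (l1 : List Char) : ∀ (l2 : List Char) (cl : Int),
    pvTailRun cl l1 l2 = pvFinalCl cl (pvMask l1 l2) := by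
  induction l1 with
  | nil => intro l2 cl; cases l2 <;> rfl
  | cons a as ih =>
    intro l2 cl
    cases l2 with
    | nil => rfl
    | cons b bs =>
      simp only [pvTailRun, pvMask, List.zip_cons_cons, List.map_cons, pvFinalCl, pvMatchAt]
      rw [ih bs]
      simp [pvMask]

-- A's fold plus the trailing flush equals pvSpec with e = len(seq1)-1
theorem pvLA (mc e : Int) (hmc : 1 ≤ mc) (l : List (Char × Char)) :
    ∀ (s : Int) (acc : List (Int × Int)) (start cl : Int), 0 ≤ cl →
    (let st := (PySem.List.enumerate l s).foldl (pvStepA mc)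
        (acc, (if cl = 0 then none else some start), cl);
     if mc ≤ st.2.2 then st.1 ++ [(st.2.1.getD 0, e)] else st.1)
    = acc ++ pvSpec mc e s start cl (l.map pvMatchAt) := by
  induction l with
  | nil =>
    intro s acc start cl hcl
    simp only [PySem.List.enumerate_nil, List.foldl_nil, List.map_nil, pvSpec]
    by_cases h : mc ≤ cl
    · have hne : ¬ cl = 0 := by omega
      simp [h, hne]
    · simp [h]
  | cons p l ih =>
    intro s acc start cl hcl
    rw [PySem.List.enumerate_cons, List.foldl_cons, List.map_cons]
    simp only [pvStepA, pvMatchAt, pvSpec]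
    by_cases hb : (p.1 != '-' && p.2 != '-' && p.1 == p.2) = true
    · rw [if_pos hb, if_pos hb]
      have hstep : (match (if cl = 0 then none else some start) with
          | none => some s | some x => some x) =
          (if cl + 1 = 0 then none else some (if cl = 0 then s else start)) := by
        by_cases h : cl = 0 <;> simp [h, show ¬ cl + 1 = 0 by omega]
      rw [hstep]
      exact ih (s + 1) acc (if cl = 0 then s else start) (cl + 1) (by omega)
    · rw [if_neg hb, if_neg hb]
      have hcs : (if mc ≤ cl then acc ++ [((if cl = 0 then none else some start).getD 0, s - 1)] else acc)
          = acc ++ (if mc ≤ cl then [(start, s - 1)] else []) := by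
        by_cases h : mc ≤ cl
        · have hne : ¬ cl = 0 := by omega
          simp [h, hne]
        · simp [h]
      rw [hcs]
      have hih := ih (s + 1) (acc ++ (if mc ≤ cl then [(start, s - 1)] else [])) s 0 le_rfl
      simp only [reduceIte] at hih
      rw [hih, List.append_assoc]

-- stepping pvSpec through an all-true prefix keeps the run open
theorem pvS (mc e : Int) (t : List Bool) (ht : t.all id = true) :
    ∀ (d : List Bool) (i start cl : Int), 1 ≤ cl →
    pvSpec mc e i start cl (t ++ d) = pvSpec mc e (i + t.length) start (cl + t.length) d := by
  induction t with
  | nil => intro d i start cl _; simp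
  | cons b t ih =>
    intro d i start cl hcl
    simp only [List.all_cons, Bool.and_eq_true, id_eq] at ht
    obtain ⟨hb, ht'⟩ := ht
    subst hb
    simp only [List.cons_append, pvSpec, reduceIte]
    have hstart : (if cl = 0 then i else start) = start := by
      have : ¬ cl = 0 := by omega
      simp [this]
    rw [hstart, ih ht' d (i + 1) start (cl + 1) (by omega)]
    have h1 : i + 1 + ((t.length : Nat) : Int) = i + (((true :: t).length : Nat) : Int) := by
      simp only [List.length_cons]; push_cast; ring
    have h2 : cl + 1 + ((t.length : Nat) : Int) = cl + (((true :: t).length : Nat) : Int) := by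
      simp only [List.length_cons]; push_cast; ring
    rw [h1, h2]

theorem pvDropHead : ∀ (l : List Bool) (b : Bool) (d : List Bool),
    l.dropWhile id = b :: d → b = false := by
  intro l
  induction l with
  | nil => intro b d h; simp at h
  | cons a as ih =>
    intro b d h
    cases a
    · simp [List.dropWhile] at h
      exact h.1
    · simp [List.dropWhile] at h
      exact ih b d h

-- B's runs-then-filter/map equals pvSpec with e = last compared index
theorem pvLB (mc : Int) (hmc : 1 ≤ mc) : ∀ (fuel : Nat), ∀ (m : List Bool), m.length ≤ fuel →
    ∀ (i : Nat) (start : Int),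
    ((pvRunsGo fuel i m).filter (fun r => mc ≤ (r.2 : Int))).map
        (fun r => ((r.1 : Int), (r.1 : Int) + (r.2 : Int) - 1))
    = pvSpec mc ((i : Int) + m.length - 1) (i : Int) start 0 m := by
  intro fuel
  induction fuel with
  | zero =>
    intro m hm i start
    have hnil : m = [] := List.eq_nil_of_length_eq_zero (by omega)
    subst hnil
    simp [pvRunsGo, pvSpec, show ¬ mc ≤ (0:Int) by omega]
  | succ fuel ihf =>
    intro m hm i start
    cases m with
    | nil => simp [pvRunsGo, pvSpec, show ¬ mc ≤ (0:Int) by omega]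
    | cons b rest =>
      cases b with
      | false =>
        simp only [pvRunsGo, pvSpec, show ¬ mc ≤ (0:Int) by omega, if_false, List.nil_append,
          List.length_cons, Bool.false_eq_true]
        rw [ihf rest (by simp only [List.length_cons] at hm; omega) (i + 1) (i : Int)]
        congr 1 <;> (push_cast; try ring)
      | true =>
        have hrest : rest.takeWhile id ++ rest.dropWhile id = rest := List.takeWhile_append_dropWhile
        have htk : (rest.takeWhile id).all id = true := by
          simp only [List.all_eq_true]
          intro x hx
          simpa using List.mem_takeWhile_imp hx
        have hfm : ∀ (x : Nat × Nat) (l : List (Nat × Nat)),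
            ((List.filter (fun r => decide (mc ≤ (r.2 : Int))) (x :: l)).map
              (fun r => ((r.1 : Int), (r.1 : Int) + (r.2 : Int) - 1)))
            = (if mc ≤ (x.2 : Int) then [((x.1 : Int), (x.1 : Int) + (x.2 : Int) - 1)] else [])
              ++ ((List.filter (fun r => decide (mc ≤ (r.2 : Int))) l).map
              (fun r => ((r.1 : Int), (r.1 : Int) + (r.2 : Int) - 1))) := by
          intro x l
          by_cases hx : mc ≤ (x.2 : Int) <;> simp [hx]
        have hdlen : (rest.dropWhile id).length ≤ fuel := by
          have h1 := List.length_dropWhile_le id rest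
          simp only [List.length_cons] at hm
          omega
        rw [show pvRunsGo (fuel + 1) i (true :: rest)
              = (i, 1 + (rest.takeWhile id).length)
                :: pvRunsGo fuel (i + (1 + (rest.takeWhile id).length)) (rest.dropWhile id) from rfl]
        rw [hfm]
        rw [ihf (rest.dropWhile id) hdlen (i + (1 + (rest.takeWhile id).length))
          ((i : Int) + (1 + ((rest.takeWhile id).length : Int)))]
        conv_rhs => rw [show (true :: rest) = true :: (rest.takeWhile id ++ rest.dropWhile id) by rw [hrest]]
        simp only [pvSpec, reduceIte, zero_add, List.length_cons, List.length_append]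
        rw [pvS mc _ (rest.takeWhile id) htk (rest.dropWhile id) ((i : Int) + 1) (i : Int) 1 le_rfl]
        cases hd : rest.dropWhile id with
        | nil =>
          simp only [pvSpec, List.length_nil]
          rw [if_neg (show ¬ mc ≤ (0:Int) by omega)]
          push_cast
          ring_nf
          simp
        | cons b' d' =>
          have hb : b' = false := pvDropHead rest b' d' hd
          subst hb
          simp only [pvSpec, Bool.false_eq_true, if_false, List.length_cons]
          rw [if_neg (show ¬ mc ≤ (0:Int) by omega)]
          push_cast
          ring_nf
          simp

-- e is unused when the trailing run does not qualify
theorem pvE (mc e1 e2 : Int) (m : List Bool) : ∀ (i start cl : Int),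
    ¬ mc ≤ pvFinalCl cl m →
    pvSpec mc e1 i start cl m = pvSpec mc e2 i start cl m := by
  induction m with
  | nil => intro i start cl h; simp only [pvFinalCl] at h; simp [pvSpec, h]
  | cons b rest ih =>
    intro i start cl h
    simp only [pvFinalCl] at h
    cases b
    · simp only [pvSpec, Bool.false_eq_true, if_false]
      rw [ih (i + 1) i 0 (by simpa using h)]
    · simp only [pvSpec]
      exact ih (i + 1) _ (cl + 1) (by simpa using h)

-- the results differ whenever the trailing run qualifies and e1 ≠ e2
theorem pvT (mc e1 e2 : Int) (hne : e1 ≠ e2) (m : List Bool) : ∀ (i start cl : Int),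
    mc ≤ pvFinalCl cl m →
    pvSpec mc e1 i start cl m ≠ pvSpec mc e2 i start cl m := by
  induction m with
  | nil =>
    intro i start cl h
    simp only [pvFinalCl] at h
    simp [pvSpec, h, hne]
  | cons b rest ih =>
    intro i start cl h
    simp only [pvFinalCl] at h
    cases b
    · simp only [pvSpec, Bool.false_eq_true, if_false]
      intro heq
      exact ih (i + 1) i 0 (by simpa using h) (List.append_cancel_left heq)
    · simp only [pvSpec]
      exact ih (i + 1) _ (cl + 1) (by simpa using h)

theorem pvA_eq (s1 s2 : String) (mc : Int) (hmc : 1 ≤ mc) :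
    find_continuous_matches s1 s2 mc
      = pvSpec mc ((s1.length : Int) - 1) 0 0 0 (pvMask s1.toList s2.toList) := by
  have h := pvLA mc ((s1.length : Int) - 1) hmc (List.zip s1.toList s2.toList) 0 [] 0 0 le_rfl
  simp only [reduceIte] at h
  simpa [find_continuous_matches, pvMask] using h

theorem pvB_eq (s1 s2 : String) (mc : Int) (hmc : 1 ≤ mc) :
    find_continuous_matches_alt s1 s2 mc
      = pvSpec mc (((min s1.toList.length s2.toList.length : Nat) : Int) - 1) 0 0 0 (pvMask s1.toList s2.toList) := by
  have h := pvLB mc hmc (pvMask s1.toList s2.toList).length (pvMask s1.toList s2.toList) le_rfl 0 0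
  have hlen : ((pvMask s1.toList s2.toList).length : Int) = ((min s1.toList.length s2.toList.length : Nat) : Int) := by
    simp [pvMask, List.length_zip]
  rw [hlen] at h
  simpa [find_continuous_matches_alt] using h

-- ===== VERDICT (by name: the statement is the Claim_ definition above) =====
theorem find_continuous_matches_spec : Claim_unchanged_find_continuous_matches := by
  intro s1 s2 mc _ hpre
  have hmc : 1 ≤ mc := hpre
  intro hnd
  rw [pvA_eq s1 s2 mc hmc, pvB_eq s1 s2 mc hmc]
  by_cases hle : s1.length ≤ s2.length
  · have hmin : min s1.toList.length s2.toList.length = s1.toList.length := by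
      simp only [String.length_toList]
      exact min_eq_left hle
    rw [hmin]
    simp [String.length_toList]
  · have h2 : ¬ mc ≤ pvTailRun 0 s1.toList s2.toList := by
      intro hc
      exact hnd ⟨by omega, hc⟩
    rw [pvTailRun_eq] at h2
    exact pvE mc _ _ (pvMask s1.toList s2.toList) 0 0 0 h2

theorem find_continuous_matches_changed : Claim_changed_find_continuous_matches := by
  unfold Claim_changed_find_continuous_matches; decide

theorem find_continuous_matches_tight : Claim_exact_find_continuous_matches := by
  intro s1 s2 mc _ hpre hd
  obtain ⟨hlt, htail⟩ := hd
  rw [pvA_eq s1 s2 mc hpre, pvB_eq s1 s2 mc hpre]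
  have hmin : min s1.toList.length s2.toList.length = s2.toList.length := by
    simp only [String.length_toList]
    exact min_eq_right (le_of_lt hlt)
  rw [hmin]
  apply pvT
  · have h1 : s2.length < s1.length := hlt
    simp only [String.length_toList]
    omega
  · rw [pvTailRun_eq] at htail
    exact htail
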